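-- pv_equiv track=rewrite | github.com/jabalpureishan/LeetCode-and-GeeksForGeeks | 3143-longest-unequal-adjacent-groups-subsequence-i/longest-unequal-adjacent-groups-subsequence-i.py | getWordsInLongestSubsequence
-- ===== SOURCE A (Python) =====
-- from typing import List
--
-- def getWordsInLongestSubsequence(n: int, words: List[str], groups: List[int]) -> List[str]:
--     ans = []
--     ptr = 0
--     length = len(words)
--     while ptr<length :
--         if ptr==length-1:
--             ans.append(words[ptr])
--         elif groups[ptr]!=groups[ptr+1]:
--             ans.append(words[ptr])
--         ptr += 1
--     return ans
-- ===== SOURCE B (Python) =====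
-- from typing import List
--
-- def getWordsInLongestSubsequence(n: int, words: List[str], groups: List[int]) -> List[str]:
--     # Tag each word with a run id (number of label changes so far) and let a dict,
--     # keyed by run id, overwrite so only the LAST word of each run survives;
--     # dict insertion order gives the runs in order.
--     last = {}
--     run = 0
--     prev = None
--     for w, g in zip(words, groups):
--         if prev is not None and g != prev:
--             run += 1
--         last[run] = w
--         prev = g
--     return list(last.values())
-- ===== Notes on version B (the rewrite author's own statement) =====
-- stated objective: alternative
-- what changed: Instead of A's index-lookahead scan that decides per position whether to emit, B tags each word with a run id (count of label changes) and lets a dict keyed by run id overwrite, so the last word of each run survives; the answer is the dict's values.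
-- outside the precondition, e.g. on getWordsInLongestSubsequence(1, ['a'], []): A returns ['a'], B returns []
import Mathlib
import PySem

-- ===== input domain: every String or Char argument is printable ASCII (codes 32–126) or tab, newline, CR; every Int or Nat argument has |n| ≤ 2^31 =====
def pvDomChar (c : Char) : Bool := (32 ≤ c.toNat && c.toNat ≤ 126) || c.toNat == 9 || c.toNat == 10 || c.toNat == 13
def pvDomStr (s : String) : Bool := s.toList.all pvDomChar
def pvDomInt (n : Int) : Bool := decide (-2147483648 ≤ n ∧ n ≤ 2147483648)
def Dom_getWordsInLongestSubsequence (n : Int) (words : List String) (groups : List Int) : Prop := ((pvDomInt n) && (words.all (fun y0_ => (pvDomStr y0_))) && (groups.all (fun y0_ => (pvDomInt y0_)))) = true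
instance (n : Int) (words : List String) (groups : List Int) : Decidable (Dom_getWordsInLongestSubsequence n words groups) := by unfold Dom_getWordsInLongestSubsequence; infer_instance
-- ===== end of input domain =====

-- B replaces A's per-position lookahead scan by run-id tagging with a dict that overwrites,
-- so only the last word of each run survives: an alternative formulation, same O(n) cost.

-- ===== PORT A =====
-- the while loop of A: state (ptr, ans); indexing via pyGetD (in range under Pre_)
def pvLoopA (words : List String) (groups : List Int) (length : Int) (ptr : Int) (ans : List String) : List String :=
  if _h : ptr < length then
    if ptr = length - 1 then
      pvLoopA words groups length (ptr + 1) (ans ++ [PySem.List.pyGetD words ptr ""])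
    else if PySem.List.pyGetD groups ptr 0 ≠ PySem.List.pyGetD groups (ptr + 1) 0 then
      pvLoopA words groups length (ptr + 1) (ans ++ [PySem.List.pyGetD words ptr ""])
    else
      pvLoopA words groups length (ptr + 1) ans
  else ans
termination_by (length - ptr).toNat
decreasing_by all_goals omega

def getWordsInLongestSubsequence (n : Int) (words : List String) (groups : List Int) : List String :=
  pvLoopA words groups (words.length : Int) 0 []

-- ===== PORT B =====
-- loop body of B: state (last : dict, run, prev); processes one (w, g) pair of zip(words, groups)
def pvStepB (st : PySem.Dict Int String × Int × Option Int) (p : String × Int) :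
    PySem.Dict Int String × Int × Option Int :=
  let run : Int := match st.2.2 with
    | some pg => if p.2 ≠ pg then st.2.1 + 1 else st.2.1
    | none => st.2.1
  (st.1.insert run p.1, run, some p.2)

def getWordsInLongestSubsequence_alt (n : Int) (words : List String) (groups : List Int) : List String :=
  ((words.zip groups).foldl pvStepB (PySem.Dict.empty, 0, none)).1.values

-- ===== PRECONDITION & SPEC =====
-- Pre_ requires len(words) <= len(groups), the problem's well-formedness: for shorter groups A raises
-- IndexError reading groups[ptr+1], except the degenerate single-word mismatch (e.g. words=["a"], groups=[])
-- where A returns ["a"] without consulting groups while B's zip truncation yields [] — a corner no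
-- specification covers, where either value is defensible.
def Pre_getWordsInLongestSubsequence (n : Int) (words : List String) (groups : List Int) : Prop :=
  words.length ≤ groups.length
instance (n : Int) (words : List String) (groups : List Int) : Decidable (Pre_getWordsInLongestSubsequence n words groups) := by unfold Pre_getWordsInLongestSubsequence; infer_instance

def pvWitness_getWordsInLongestSubsequence : Int × List String × List Int := (3, ["a", "b", "c"], [1, 1, 2])

def Spec_getWordsInLongestSubsequence (n : Int) (words : List String) (groups : List Int) (out : List String) : Prop := out = getWordsInLongestSubsequence_alt n words groups
instance (n : Int) (words : List String) (groups : List Int) (out : List String) : Decidable (Spec_getWordsInLongestSubsequence n words groups out) := by unfold Spec_getWordsInLongestSubsequence; infer_instance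

-- ===== CLAIM (what is proved, stated in full; the proofs are below) =====
def Claim_equal_getWordsInLongestSubsequence : Prop := ∀ (n : Int) (words : List String) (groups : List Int), Dom_getWordsInLongestSubsequence n words groups → Pre_getWordsInLongestSubsequence n words groups → Spec_getWordsInLongestSubsequence n words groups (getWordsInLongestSubsequence n words groups)

-- ===== LEMMAS AND PROOFS =====

-- mediator: "word whose next group differs, plus the final word", structurally on the zipped list
def pvF : List (String × Int) → List String
  | [] => []
  | [p] => [p.1]
  | p :: q :: t => (if p.2 ≠ q.2 then [p.1] else []) ++ pvF (q :: t)

-- B's dict-fold invariant: the dict holds one entry per finished run plus the entry (run, w0)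
-- of the current run (pg its label); its values are those words followed by pvF of the rest.
theorem stepB_invariant (l : List (String × Int)) :
    ∀ (d : PySem.Dict Int String) (es : List (Int × String)) (run : Int) (w0 : String) (pg : Int),
    d.items = es ++ [(run, w0)] → (∀ k ∈ es.map Prod.fst, k < run) →
    ((l.foldl pvStepB (d, run, some pg)).1).values = es.map Prod.snd ++ pvF ((w0, pg) :: l) := by
  induction l with
  | nil =>
    intro d es run w0 pg hitems _
    simp [pvF, PySem.Dict.values, hitems]
  | cons p t ih =>
    intro d es run w0 pg hitems hlt
    obtain ⟨w, g⟩ := p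
    have hkeys : d.keys = es.map Prod.fst ++ [run] := by
      simp [PySem.Dict.keys, hitems]
    by_cases h : g = pg
    · -- same run: insert overwrites the last entry (run, w0) with (run, w)
      have hcont : d.contains run = true := by
        rw [PySem.Dict.contains_eq_decide_mem_keys, hkeys]; simp
      have hitems' : (d.insert run w).items = es ++ [(run, w)] := by
        rw [PySem.Dict.items_insert_of_contains d w hcont, hitems, List.map_append]
        congr 1
        · conv_rhs => rw [← List.map_id es]
          apply List.map_congr_left
          intro x hx
          have hx1 : x.1 < run := hlt x.1 (List.mem_map_of_mem hx)
          have : (x.1 == run) = false := by simp; omega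
          simp [this]
        · simp
      have hrec := ih (d.insert run w) es run w pg hitems' hlt
      simp only [List.foldl_cons, pvStepB, h, ne_eq, not_true_eq_false, if_false]
      rw [hrec]
      simp [pvF]
    · -- new run: run+1 is a fresh key, insert appends (run+1, w)
      have hcont : d.contains (run + 1) = false := by
        rw [PySem.Dict.contains_eq_decide_mem_keys, hkeys]
        simp only [decide_eq_false_iff_not, List.mem_append, List.mem_singleton]
        rintro (hm | hm)
        · have := hlt _ hm; omega
        · omega
      have hitems' : (d.insert (run + 1) w).items = (es ++ [(run, w0)]) ++ [(run + 1, w)] := by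
        rw [PySem.Dict.items_insert_of_not_contains d w hcont, hitems]
      have hlt' : ∀ k ∈ (es ++ [(run, w0)]).map Prod.fst, k < run + 1 := by
        intro k hk
        simp only [List.map_append, List.mem_append, List.map_cons,
          List.map_nil, List.mem_cons] at hk
        rcases hk with hk | hk
        · have := hlt k hk; omega
        · simp at hk; omega
      have hrec := ih (d.insert (run + 1) w) (es ++ [(run, w0)]) (run + 1) w g hitems' hlt'
      simp only [List.foldl_cons, pvStepB, ne_eq, h, not_false_eq_true, if_true]
      rw [hrec]
      simp [pvF, Ne.symm h]

-- B computes pvF of the zipped list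
theorem altB_eq_pvF (n : Int) (words : List String) (groups : List Int) :
    getWordsInLongestSubsequence_alt n words groups = pvF (words.zip groups) := by
  unfold getWordsInLongestSubsequence_alt
  cases hz : words.zip groups with
  | nil => simp [PySem.Dict.values, PySem.Dict.empty, pvF]
  | cons p t =>
    obtain ⟨w, g⟩ := p
    have h0 : (PySem.Dict.empty.insert (0 : Int) w).items = [] ++ [((0 : Int), w)] := by
      rw [PySem.Dict.items_insert_of_not_contains PySem.Dict.empty w (PySem.Dict.contains_empty 0)]
      simp [PySem.Dict.empty]
    have := stepB_invariant t (PySem.Dict.empty.insert 0 w) [] 0 w g h0 (by simp)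
    simp only [List.foldl_cons, pvStepB] at *
    simpa using this

-- A's loop computes ans ++ pvF of the zipped tail
theorem loopA_eq (words : List String) (groups : List Int) (hlen : words.length ≤ groups.length) :
    ∀ (k : Nat) (ans : List String), k ≤ words.length →
      pvLoopA words groups (words.length : Int) (k : Int) ans = ans ++ pvF ((words.zip groups).drop k) := by
  intro k
  induction hk : words.length - k generalizing k with
  | zero =>
    intro ans hle
    have hek : k = words.length := by omega
    subst hek
    rw [pvLoopA, dif_neg (by omega)]
    rw [List.drop_eq_nil_of_le (by rw [List.length_zip]; omega)]
    simp [pvF]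
  | succ m ih =>
    intro ans hle
    have hlt : k < words.length := by omega
    rw [pvLoopA, dif_pos (by exact_mod_cast hlt)]
    have hzlen : (words.zip groups).length = words.length := by
      rw [List.length_zip]; omega
    have hdrop : (words.zip groups).drop k = (words[k]!, groups[k]!) :: (words.zip groups).drop (k+1) := by
      have hk' : k < (words.zip groups).length := by omega
      rw [List.drop_eq_getElem_cons hk']
      congr 1
      rw [List.getElem_zip]
      simp [List.getElem!_eq_getElem?_getD, List.getElem?_eq_getElem hlt,
        List.getElem?_eq_getElem (show k < groups.length by omega)]
    have hwk : PySem.List.pyGetD words (k : Int) "" = words[k]! := by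
      rw [PySem.List.pyGetD_natCast]
      simp [List.getD, List.getElem!_eq_getElem?_getD]
    have hrec : ∀ a, pvLoopA words groups (words.length : Int) ((k : Int) + 1) a
        = a ++ pvF ((words.zip groups).drop (k+1)) := by
      intro a
      have hc : ((k : Int) + 1) = ((k + 1 : Nat) : Int) := by push_cast; ring
      rw [hc, ih (k+1) (by omega) a (by omega)]
    by_cases hlast : k = words.length - 1
    · rw [if_pos (by omega), hrec]
      have hdrop1 : (words.zip groups).drop (k+1) = [] := by
        apply List.drop_eq_nil_of_le; omega
      rw [hdrop, hdrop1, hwk]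
      simp [pvF]
    · rw [if_neg (by omega)]
      have hk1w : k + 1 < words.length := by omega
      have hgk : PySem.List.pyGetD groups (k : Int) 0 = groups[k]! := by
        rw [PySem.List.pyGetD_natCast]
        simp [List.getD, List.getElem!_eq_getElem?_getD,
          List.getElem?_eq_getElem (show k < groups.length by omega)]
      have hgk1 : PySem.List.pyGetD groups ((k : Int) + 1) 0 = groups[k+1]! := by
        have hc : ((k : Int) + 1) = ((k + 1 : Nat) : Int) := by push_cast; ring
        rw [hc, PySem.List.pyGetD_natCast]
        simp [List.getD, List.getElem!_eq_getElem?_getD,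
          List.getElem?_eq_getElem (show k + 1 < groups.length by omega)]
      have hdrop2 : (words.zip groups).drop (k+1) = (words[k+1]!, groups[k+1]!) :: (words.zip groups).drop (k+2) := by
        have hk' : k + 1 < (words.zip groups).length := by omega
        rw [List.drop_eq_getElem_cons hk']
        congr 1
        rw [List.getElem_zip]
        simp [List.getElem!_eq_getElem?_getD, List.getElem?_eq_getElem hk1w,
          List.getElem?_eq_getElem (show k + 1 < groups.length by omega)]
      rw [hgk, hgk1, hwk]
      by_cases hgg : groups[k]! ≠ groups[k+1]!
      · have hgg' : ¬ groups[k]?.getD 0 = groups[k+1]?.getD 0 := by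
          simpa [List.getElem!_eq_getElem?_getD] using hgg
        rw [if_pos hgg, hrec, hdrop, hdrop2, pvF]
        simp [hgg']
      · have hgg' : groups[k]?.getD 0 = groups[k+1]?.getD 0 := by
          simpa [List.getElem!_eq_getElem?_getD] using not_not.mp hgg
        rw [if_neg hgg, hrec, hdrop, hdrop2, pvF]
        simp [hgg']

-- ===== VERDICT (by name: the statement is the Claim_ definition above) =====
theorem getWordsInLongestSubsequence_spec : Claim_equal_getWordsInLongestSubsequence := by
  intro n words groups _ hpre
  unfold Spec_getWordsInLongestSubsequence getWordsInLongestSubsequence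
  rw [show (0 : Int) = ((0 : Nat) : Int) from rfl, loopA_eq words groups hpre 0 [] (by omega)]
  rw [altB_eq_pvF]
  simp
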